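-- pv_equiv track=rewrite | github.com/mamontoboi/Python_Online_Marathon | Sprint_01/Quiz_task_1.py | kthTerm
-- ===== SOURCE A (Python) =====
-- def kthTerm(n, k):
--     bin_val = bin(k)[2:]
--
--     bin_code = [x for x in bin_val]
--
--     result = 0
--     for i in range(len(bin_code)):
--         num = bin_code.pop(-1)
--         if int(num):
--             fig = n ** i
--             result += fig
--
--     return result
-- ===== SOURCE B (Python) =====
-- def kthTerm(n, k):
--     result = 0
--     for d in bin(k)[2:]:
--         result = result * n + int(d)
--     return result
-- ===== Notes on version B (the rewrite author's own statement) =====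
-- stated objective: simpler
-- what changed: Replaces the pop-from-end loop with explicit exponentiation n**i by a single MSB-first Horner fold result = result*n + int(d) over the binary digits.
import Mathlib
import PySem

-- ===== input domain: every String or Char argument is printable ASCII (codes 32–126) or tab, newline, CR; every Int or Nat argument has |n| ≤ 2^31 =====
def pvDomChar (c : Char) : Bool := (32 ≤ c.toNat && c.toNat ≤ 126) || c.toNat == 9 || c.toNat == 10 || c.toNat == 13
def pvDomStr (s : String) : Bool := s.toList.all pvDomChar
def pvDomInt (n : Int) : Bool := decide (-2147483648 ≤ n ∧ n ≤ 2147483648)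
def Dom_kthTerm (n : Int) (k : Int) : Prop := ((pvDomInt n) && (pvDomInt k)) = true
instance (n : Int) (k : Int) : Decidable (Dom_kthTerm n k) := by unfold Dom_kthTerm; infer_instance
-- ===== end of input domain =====

-- B replaces A's pop-from-end loop with n**i by one MSB-first Horner fold (simpler; same values).

-- ===== PORT A =====
-- bin(k)[2:] for k ≥ 0: the binary digit characters of k, most significant first ('0' for k = 0).
def binGo (m : Nat) : List Char :=
  if m = 0 then [] else binGo (m / 2) ++ [if m % 2 = 1 then '1' else '0']
decreasing_by exact Nat.div_lt_self (Nat.pos_of_ne_zero (by assumption)) (by norm_num)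

def binChars (m : Nat) : List Char := if m = 0 then ['0'] else binGo m

-- the loop: for i in range(len(bin_code)): num = bin_code.pop(-1); if int(num): result += n ** i
def aLoop (n : Int) (bc : List Char) (i : Nat) (result : Int) : Int :=
  match h : bc.getLast? with
  | none => result
  | some num =>
      aLoop n bc.dropLast (i + 1)
        (if ((num.toNat : Int) - 48) ≠ 0 then result + n ^ i else result)
termination_by bc.length
decreasing_by
  have hne : bc ≠ [] := by intro e; simp [e] at h
  have := List.length_pos_iff.mpr hne
  simp [List.length_dropLast]; omega

def kthTerm (n : Int) (k : Int) : Int :=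
  aLoop n (binChars k.toNat) 0 0

-- ===== PORT B =====
def kthTerm_alt (n : Int) (k : Int) : Int :=
  (binChars k.toNat).foldl (fun result d => result * n + ((d.toNat : Int) - 48)) 0

-- ===== PRECONDITION & SPEC =====
-- A (and B) raise ValueError for k < 0: bin(k)[2:] then starts with 'b'. Pre_ excludes exactly those.
def Pre_kthTerm (n : Int) (k : Int) : Prop := 0 ≤ k
instance (n : Int) (k : Int) : Decidable (Pre_kthTerm n k) := by unfold Pre_kthTerm; infer_instance
def pvWitness_kthTerm : Int × Int := (3, 5)
def Spec_kthTerm (n : Int) (k : Int) (out : Int) : Prop := out = kthTerm_alt n k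
instance (n : Int) (k : Int) (out : Int) : Decidable (Spec_kthTerm n k out) := by unfold Spec_kthTerm; infer_instance

-- ===== CLAIM (what is proved, stated in full; the proofs are below) =====
def Claim_equal_kthTerm : Prop := ∀ (n : Int) (k : Int), Dom_kthTerm n k → Pre_kthTerm n k → Spec_kthTerm n k (kthTerm n k)

-- ===== LEMMAS AND PROOFS =====

theorem binGo_binary : ∀ (m : Nat), ∀ c ∈ binGo m, c = '0' ∨ c = '1' := by
  intro m
  induction m using Nat.strong_induction_on with
  | _ m ih =>
    intro c hc
    rw [binGo] at hc
    split at hc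
    · simp at hc
    · rcases List.mem_append.mp hc with h | h
      · exact ih (m / 2) (Nat.div_lt_self (Nat.pos_of_ne_zero (by assumption)) (by norm_num)) c h
      · simp at h; split at h <;> simp [h]

theorem binChars_binary (m : Nat) : ∀ c ∈ binChars m, c = '0' ∨ c = '1' := by
  intro c hc
  rw [binChars] at hc
  split at hc
  · simp at hc; simp [hc]
  · exact binGo_binary m c hc

theorem foldl_horner (n r : Int) (bc : List Char) :
    bc.foldl (fun result d => result * n + ((d.toNat : Int) - 48)) r =
      r * n ^ bc.length + bc.foldl (fun result d => result * n + ((d.toNat : Int) - 48)) 0 := by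
  induction bc generalizing r with
  | nil => simp
  | cons c t ih =>
    simp only [List.foldl_cons, List.length_cons]
    rw [ih (r * n + _), ih (0 * n + _)]
    ring

theorem aLoop_eq (n : Int) (bc : List Char) (hb : ∀ c ∈ bc, c = '0' ∨ c = '1') (i : Nat) (r : Int) :
    aLoop n bc i r =
      r + (bc.foldl (fun result d => result * n + ((d.toNat : Int) - 48)) 0) * n ^ i := by
  induction bc using List.reverseRecOn generalizing i r with
  | nil => rw [aLoop]; simp
  | append_singleton t c ih =>
    rw [aLoop]
    simp only [List.dropLast_concat]
    have ht : ∀ x ∈ t, x = '0' ∨ x = '1' := fun x hx => hb x (by simp [hx])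
    split
    next h => simp [List.getLast?_concat] at h
    next num h =>
    have hnum : num = c := by simpa using h.symm
    rw [hnum, ih ht]
    rw [List.foldl_append, List.foldl_cons, List.foldl_nil, foldl_horner]
    rcases hb c (by simp) with h | h <;> subst h <;> simp <;> ring

-- ===== VERDICT (by name: the statement is the Claim_ definition above) =====
theorem kthTerm_spec : Claim_equal_kthTerm := by
  intro n k _ _
  show kthTerm n k = kthTerm_alt n k
  rw [kthTerm, kthTerm_alt, aLoop_eq n _ (binChars_binary k.toNat)]
  simp
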